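-- pv_equiv track=rewrite | github.com/PrinceBashangezi/CS51P-Final-Project | finalproject.py | house_party_winner_by_state_per_year
-- ===== SOURCE A (Python) =====
-- def house_party_winner_by_state_per_year(d):
--     """
--     determines the party winner by state per year based on the input dictionary.
--     :param d: (dict): Input dictionary where keys represent years and states, and values represent the winning party.
--     :return: dict: A dictionary where keys are years and values are the winning party (DEMOCRAT, REPUBLICAN, or NONE).
--
--     """
--
--
--     party_winner = {}
--
--     # Iterate through the input dictionary to organize data by state and year
--     for key in d.keys():
--         lst = []
--         if key[:-3:] not in party_winner:
--             lst.append(d[key])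
--             party_winner[key[:-3:]] = lst
--         else:
--             party_winner[key[:-3:]].append(d[key])
--
--     winner_party_dict = {}
--
--     # Iterate through the organized data to determine the winning party for each state and year
--     for key1 in party_winner.keys():
--         democrat = 0
--         republican = 0
--         for elm in party_winner[key1]:
--             if elm == "REPUBLICAN":
--                 republican += 1
--             elif elm == "DEMOCRAT":
--                 democrat += 1
--
--         # Determine the winning party based on the count of Republican and Democrat votes
--         if democrat > republican:
--             winner_party_dict[key1] = "DEMOCRAT"
--         elif republican > democrat:
--             winner_party_dict[key1] = "REPUBLICAN"
--         elif republican == democrat: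
--             winner_party_dict[key1] = "NONE"
--
--     return winner_party_dict
-- ===== SOURCE B (Python) =====
-- def house_party_winner_by_state_per_year(d):
--     tallies = {}
--     for key, value in d.items():
--         prefix = key[:-3]
--         dem, rep = tallies.get(prefix, (0, 0))
--         if value == "DEMOCRAT":
--             dem += 1
--         elif value == "REPUBLICAN":
--             rep += 1
--         tallies[prefix] = (dem, rep)
--     return {p: ("DEMOCRAT" if dem > rep else "REPUBLICAN" if rep > dem else "NONE")
--             for p, (dem, rep) in tallies.items()}
-- ===== Notes on version B (the rewrite author's own statement) =====
-- stated objective: alternative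
-- what changed: B replaces A's two-phase pipeline (group every vote into per-prefix lists, then a second pass counting each list) by a single pass that keeps a running (democrat, republican) integer tally per prefix and emits the verdict directly from the tallies.
import Mathlib
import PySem

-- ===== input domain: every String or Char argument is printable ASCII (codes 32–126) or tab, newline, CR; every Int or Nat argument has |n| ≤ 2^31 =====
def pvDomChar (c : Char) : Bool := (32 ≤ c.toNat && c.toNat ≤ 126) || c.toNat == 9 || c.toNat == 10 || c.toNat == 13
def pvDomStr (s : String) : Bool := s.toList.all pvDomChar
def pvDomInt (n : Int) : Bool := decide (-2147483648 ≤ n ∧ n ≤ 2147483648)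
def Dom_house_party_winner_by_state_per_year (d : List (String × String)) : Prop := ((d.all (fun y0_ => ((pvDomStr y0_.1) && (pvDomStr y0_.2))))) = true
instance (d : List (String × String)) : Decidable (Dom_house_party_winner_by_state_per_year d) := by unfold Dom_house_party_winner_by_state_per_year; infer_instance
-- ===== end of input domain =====

-- B fuses A's group-into-lists pass and its per-group counting pass into one pass that
-- keeps running (democrat, republican) tallies per prefix; equal output, same asymptotic cost.

-- key[:-3:] (shared by both ports: both Pythons compute exactly this slice)
def pvPrefix (s : String) : String := String.ofList (PySem.List.slice s.toList none (some (-3)))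

-- ===== PORT A =====
def house_party_winner_by_state_per_year (d : List (String × String)) : List (String × String) :=
  let dd : PySem.Dict String String := PySem.Dict.mk d
  -- for key in d.keys(): group d[key] into party_winner[key[:-3:]]
  let pw : PySem.Dict String (List String) :=
    dd.keys.foldl (fun pw key =>
      if pw.contains (pvPrefix key) = false then
        pw.insert (pvPrefix key) ([] ++ [dd.getD key ""])
      else
        pw.modify (pvPrefix key) [] (fun s => s ++ [dd.getD key ""])) PySem.Dict.empty
  -- for key1 in party_winner.keys(): count, then insert the winner
  let wd : PySem.Dict String String :=
    pw.keys.foldl (fun wd key1 =>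
      let counts : Int × Int :=
        (pw.getD key1 []).foldl (fun c elm =>
          if elm = "REPUBLICAN" then (c.1, c.2 + 1)
          else if elm = "DEMOCRAT" then (c.1 + 1, c.2)
          else c) (0, 0)
      if counts.1 > counts.2 then wd.insert key1 "DEMOCRAT"
      else if counts.2 > counts.1 then wd.insert key1 "REPUBLICAN"
      else if counts.2 = counts.1 then wd.insert key1 "NONE"
      else wd) PySem.Dict.empty
  wd.items

-- ===== PORT B =====
def house_party_winner_by_state_per_year_alt (d : List (String × String)) : List (String × String) :=
  -- one pass: running (dem, rep) tallies per prefix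
  let t : PySem.Dict String (Int × Int) :=
    d.foldl (fun t p =>
      let c := t.getD (pvPrefix p.1) (0, 0)
      let c' := if p.2 = "DEMOCRAT" then (c.1 + 1, c.2)
                else if p.2 = "REPUBLICAN" then (c.1, c.2 + 1)
                else c
      t.insert (pvPrefix p.1) c') PySem.Dict.empty
  -- dict comprehension over tallies.items()
  t.items.map (fun q => (q.1,
    if q.2.1 > q.2.2 then "DEMOCRAT"
    else if q.2.2 > q.2.1 then "REPUBLICAN"
    else "NONE"))

-- ===== PRECONDITION & SPEC =====
-- Pre_ excludes association lists with a duplicated key: those do not represent any Python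
-- dict (the function's parameter is a dict), so Python A is never run on them.
def Pre_house_party_winner_by_state_per_year (d : List (String × String)) : Prop :=
  (d.map Prod.fst).Nodup
instance (d : List (String × String)) : Decidable (Pre_house_party_winner_by_state_per_year d) := by
  unfold Pre_house_party_winner_by_state_per_year; infer_instance
def pvWitness_house_party_winner_by_state_per_year : (List (String × String)) :=
  [("AL1976", "DEMOCRAT"), ("AL1978", "REPUBLICAN"), ("WY1976", "whig")]
def Spec_house_party_winner_by_state_per_year (d : List (String × String)) (out : List (String × String)) : Prop := out = house_party_winner_by_state_per_year_alt d
instance (d : List (String × String)) (out : List (String × String)) : Decidable (Spec_house_party_winner_by_state_per_year d out) := by unfold Spec_house_party_winner_by_state_per_year; infer_instance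

-- ===== CLAIM (what is proved, stated in full; the proofs are below) =====
def Claim_equal_house_party_winner_by_state_per_year : Prop := ∀ (d : List (String × String)), Dom_house_party_winner_by_state_per_year d → Pre_house_party_winner_by_state_per_year d → Spec_house_party_winner_by_state_per_year d (house_party_winner_by_state_per_year d)

-- ===== LEMMAS AND PROOFS =====

-- A's grouping step over a pair (prefix-lookup version, value already in hand)
def pvGStep (pw : PySem.Dict String (List String)) (p : String × String) : PySem.Dict String (List String) :=
  if pw.contains (pvPrefix p.1) = false then
    pw.insert (pvPrefix p.1) ([] ++ [p.2])
  else
    pw.modify (pvPrefix p.1) [] (fun s => s ++ [p.2])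

-- B's tally step
def pvBStep (t : PySem.Dict String (Int × Int)) (p : String × String) : PySem.Dict String (Int × Int) :=
  let c := t.getD (pvPrefix p.1) (0, 0)
  let c' := if p.2 = "DEMOCRAT" then (c.1 + 1, c.2)
            else if p.2 = "REPUBLICAN" then (c.1, c.2 + 1)
            else c
  t.insert (pvPrefix p.1) c'

lemma pvG_spec (l : List (String × String)) :
    (l.foldl pvGStep PySem.Dict.empty).keys = PySem.Set.ofList (l.map fun p => pvPrefix p.1) ∧
    ∀ c, (l.foldl pvGStep PySem.Dict.empty).getD c [] =
      (l.filter (fun p => pvPrefix p.1 == c)).map Prod.snd := by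
  induction l using List.reverseRecOn with
  | nil => simp [PySem.Dict.empty, PySem.Dict.keys, PySem.Set.ofList_nil, PySem.Dict.getD, PySem.Dict.get?]
  | append_singleton l x ih =>
    obtain ⟨hk, hg⟩ := ih
    rw [List.foldl_append, List.foldl_cons, List.foldl_nil]
    set pw := l.foldl pvGStep PySem.Dict.empty with hpw
    have hmem : pw.contains (pvPrefix x.1) = true ↔ pvPrefix x.1 ∈ l.map (fun p => pvPrefix p.1) := by
      rw [PySem.Dict.contains_iff_mem_keys, hk, PySem.Set.mem_ofList]
    by_cases hc : pw.contains (pvPrefix x.1) = true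
    · -- already grouped: modify appends the value
      have hstep : pvGStep pw x = pw.modify (pvPrefix x.1) [] (fun s => s ++ [x.2]) := by
        simp [pvGStep, hc]
      constructor
      · rw [hstep, PySem.Dict.keys_modify, PySem.Dict.keys_insert_of_contains _ _ hc, hk,
          List.map_append, List.map_cons, List.map_nil, PySem.Set.ofList_append_singleton,
          PySem.Set.add_of_mem (by rw [PySem.Set.mem_ofList]; exact hmem.mp hc)]
      · intro c
        rw [hstep, PySem.Dict.getD_modify, List.filter_append, List.map_append]
        by_cases hck : c = pvPrefix x.1
        · subst hck; simp [hg]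
        · have hb : (pvPrefix x.1 == c) = false := by simp [Ne.symm hck]
          simp [hck, hg, List.filter, hb]
    · have hc' : pw.contains (pvPrefix x.1) = false := by simpa using hc
      have hnot : pvPrefix x.1 ∉ l.map (fun p => pvPrefix p.1) := fun h => hc (hmem.mpr h)
      have hstep : pvGStep pw x = pw.insert (pvPrefix x.1) ([] ++ [x.2]) := by
        simp [pvGStep, hc']
      constructor
      · rw [hstep, PySem.Dict.keys_insert_of_not_contains _ _ hc', hk, List.map_append,
          List.map_cons, List.map_nil, PySem.Set.ofList_append_singleton,
          PySem.Set.add_of_not_mem (by rw [PySem.Set.mem_ofList]; exact hnot)]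
      · intro c
        rw [hstep, PySem.Dict.getD_insert, List.filter_append, List.map_append]
        by_cases hck : c = pvPrefix x.1
        · subst hck
          have hfil : l.filter (fun p => pvPrefix p.1 == pvPrefix x.1) = [] := by
            apply List.filter_eq_nil_iff.mpr
            intro p hp hbeq
            exact hnot (List.mem_map.mpr ⟨p, hp, by simpa using hbeq⟩)
          simp [hfil]
        · have hb : (pvPrefix x.1 == c) = false := by simp [Ne.symm hck]
          simp [hck, hg, List.filter, hb]

lemma pvB_spec (l : List (String × String)) :
    (l.foldl pvBStep PySem.Dict.empty).keys = PySem.Set.ofList (l.map fun p => pvPrefix p.1) ∧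
    ∀ c, (l.foldl pvBStep PySem.Dict.empty).getD c (0, 0) =
      ((((l.filter (fun p => pvPrefix p.1 == c)).map Prod.snd).count "DEMOCRAT" : Int),
       (((l.filter (fun p => pvPrefix p.1 == c)).map Prod.snd).count "REPUBLICAN" : Int)) := by
  induction l using List.reverseRecOn with
  | nil => simp [PySem.Dict.empty, PySem.Dict.keys, PySem.Set.ofList_nil, PySem.Dict.getD, PySem.Dict.get?]
  | append_singleton l x ih =>
    obtain ⟨hk, hg⟩ := ih
    rw [List.foldl_append, List.foldl_cons, List.foldl_nil]
    set t := l.foldl pvBStep PySem.Dict.empty with ht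
    constructor
    · rw [show pvBStep t x = t.insert (pvPrefix x.1) _ from rfl]
      rw [List.map_append, List.map_cons, List.map_nil, PySem.Set.ofList_append_singleton]
      by_cases hc : t.contains (pvPrefix x.1) = true
      · have hmem : pvPrefix x.1 ∈ PySem.Set.ofList (l.map fun p => pvPrefix p.1) := by
          rw [← hk]; exact (PySem.Dict.contains_iff_mem_keys _ _).mp hc
        rw [PySem.Dict.keys_insert_of_contains _ _ hc, hk, PySem.Set.add_of_mem hmem]
      · have hc' : t.contains (pvPrefix x.1) = false := by simpa using hc
        have hnot : pvPrefix x.1 ∉ PySem.Set.ofList (l.map fun p => pvPrefix p.1) := by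
          rw [← hk]; exact fun h => hc ((PySem.Dict.contains_iff_mem_keys _ _).mpr h)
        rw [PySem.Dict.keys_insert_of_not_contains _ _ hc', hk, PySem.Set.add_of_not_mem hnot]
    · intro c
      rw [show pvBStep t x = t.insert (pvPrefix x.1)
            (if x.2 = "DEMOCRAT" then ((t.getD (pvPrefix x.1) (0, 0)).1 + 1, (t.getD (pvPrefix x.1) (0, 0)).2)
             else if x.2 = "REPUBLICAN" then ((t.getD (pvPrefix x.1) (0, 0)).1, (t.getD (pvPrefix x.1) (0, 0)).2 + 1)
             else t.getD (pvPrefix x.1) (0, 0)) from rfl]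
      rw [PySem.Dict.getD_insert, List.filter_append]
      by_cases hck : c = pvPrefix x.1
      · subst hck
        have hfx : (pvPrefix x.1 == pvPrefix x.1) = true := by simp
        rw [if_pos rfl, hg]
        by_cases h1 : x.2 = "DEMOCRAT"
        · simp [List.filter, h1, List.count_append]
        · by_cases h2 : x.2 = "REPUBLICAN"
          · simp [List.filter, h2, List.count_append]
          · simp [List.filter, h1, h2, List.count_append]
      · have hb : (pvPrefix x.1 == c) = false := by simp [Ne.symm hck]
        simp [hck, hg, List.filter, hb]

lemma pvCount_spec (grp : List String) (a b : Int) :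
    grp.foldl (fun c elm =>
        if elm = "REPUBLICAN" then (c.1, c.2 + 1)
        else if elm = "DEMOCRAT" then (c.1 + 1, c.2)
        else c) (a, b) =
      (a + (grp.count "DEMOCRAT" : Int), b + (grp.count "REPUBLICAN" : Int)) := by
  induction grp generalizing a b with
  | nil => simp
  | cons x xs ih =>
    by_cases h1 : x = "REPUBLICAN"
    · subst h1; simp [ih]; ring
    · by_cases h2 : x = "DEMOCRAT"
      · subst h2; simp [ih, h1]; ring
      · simp [h1, h2, ih]

def pvVerdict (c : Int × Int) : String :=
  if c.1 > c.2 then "DEMOCRAT" else if c.2 > c.1 then "REPUBLICAN" else "NONE"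

lemma pvA_eq (d : List (String × String)) (hpre : (d.map Prod.fst).Nodup) :
    house_party_winner_by_state_per_year d =
      (d.foldl pvGStep PySem.Dict.empty).keys.map
        (fun k => (k, pvVerdict
          ((((d.foldl pvGStep PySem.Dict.empty).getD k []).count "DEMOCRAT" : Int),
           (((d.foldl pvGStep PySem.Dict.empty).getD k []).count "REPUBLICAN" : Int)))) := by
  simp only [house_party_winner_by_state_per_year]
  have hkeys : (PySem.Dict.mk d).keys = d.map Prod.fst := by simp [PySem.Dict.keys]
  rw [hkeys, List.foldl_map]
  have hnd : (PySem.Dict.mk d).keys.Nodup := by rw [hkeys]; exact hpre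
  have hcong : ∀ (acc : PySem.Dict String (List String)), ∀ p ∈ d,
      (if acc.contains (pvPrefix p.1) = false then
        acc.insert (pvPrefix p.1) ([] ++ [(PySem.Dict.mk d).getD p.1 ""])
      else acc.modify (pvPrefix p.1) [] (fun s => s ++ [(PySem.Dict.mk d).getD p.1 ""]))
        = pvGStep acc p := by
    intro acc p hp
    have hv : (PySem.Dict.mk d).getD p.1 "" = p.2 :=
      PySem.Dict.getD_of_mem_items (PySem.Dict.mk d)
        (by simpa using hp) hnd ""
    rw [hv]; rfl
  rw [PySem.List.foldl_congr_mem d _ pvGStep _ hcong]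
  set pw := d.foldl pvGStep PySem.Dict.empty with hpw
  have hndpw : pw.keys.Nodup := by
    rw [(pvG_spec d).1]; exact PySem.Set.nodup_ofList _
  have hstep2 : (fun (wd : PySem.Dict String String) key1 =>
      let counts : Int × Int :=
        (pw.getD key1 []).foldl (fun c elm =>
          if elm = "REPUBLICAN" then (c.1, c.2 + 1)
          else if elm = "DEMOCRAT" then (c.1 + 1, c.2)
          else c) (0, 0)
      if counts.1 > counts.2 then wd.insert key1 "DEMOCRAT"
      else if counts.2 > counts.1 then wd.insert key1 "REPUBLICAN"
      else if counts.2 = counts.1 then wd.insert key1 "NONE"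
      else wd) =
      (fun wd k => wd.insert k (pvVerdict
        (((pw.getD k []).count "DEMOCRAT" : Int),
         ((pw.getD k []).count "REPUBLICAN" : Int)))) := by
    funext wd k
    simp only [pvCount_spec, zero_add, pvVerdict]
    split_ifs with h1 h2 h3 <;> first | rfl | omega
  rw [hstep2]
  have hitems := PySem.Dict.items_foldl_insert_fresh pw.keys (fun k => k)
    (fun k => pvVerdict
      (((pw.getD k []).count "DEMOCRAT" : Int),
       ((pw.getD k []).count "REPUBLICAN" : Int)))
    PySem.Dict.empty (fun a _ => PySem.Dict.contains_empty a) (by simpa using hndpw)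
  simp only [] at hitems
  rw [hitems]
  simp [PySem.Dict.empty]

lemma pvB_eq (d : List (String × String)) :
    house_party_winner_by_state_per_year_alt d =
      (d.foldl pvBStep PySem.Dict.empty).keys.map
        (fun k => (k, pvVerdict ((d.foldl pvBStep PySem.Dict.empty).getD k (0, 0)))) := by
  show ((d.foldl pvBStep PySem.Dict.empty).items.map (fun q => (q.1, pvVerdict q.2))) = _
  have hnd : (d.foldl pvBStep PySem.Dict.empty).keys.Nodup := by
    rw [(pvB_spec d).1]; exact PySem.Set.nodup_ofList _
  rw [PySem.Dict.items_eq_map_keys _ hnd (0, 0), List.map_map]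
  rfl

-- ===== VERDICT (by name: the statement is the Claim_ definition above) =====
theorem house_party_winner_by_state_per_year_spec : Claim_equal_house_party_winner_by_state_per_year := by
  intro d _ hpre
  unfold Spec_house_party_winner_by_state_per_year
  rw [pvA_eq d hpre, pvB_eq d, (pvG_spec d).1, (pvB_spec d).1]
  apply List.map_congr_left
  intro k _
  rw [(pvG_spec d).2 k, (pvB_spec d).2 k]
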